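-- pv_equiv track=rewrite | github.com/ZJX97/DiT-HC | DiT/stepwise/AutoMem/mpi_train/rankfiles/rf_gen.py | generate_rankfile
-- ===== SOURCE A (Python) =====
-- import math
--
-- def generate_rankfile(total_processes, ip_list, cores_per_process):
--     """
--
--     total_processes
--     ip_list ["29.204.25.53", "29.204.25.76"]
--     cores_per_process
--
--     """
--
--     if not ip_list:
--         raise ValueError("IP list cannot be empty")
--
--     cpu_per_node = 2
--     cores_per_cpu = 304
--     cores_per_node = cpu_per_node * cores_per_cpu
--
--     total_cores_needed = total_processes * cores_per_process
--
--     processes_per_node = cores_per_node // cores_per_process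
--
--     nodes_needed = math.ceil(total_processes / processes_per_node)
--
--     if nodes_needed > len(ip_list):
--         cycles_needed = math.ceil(nodes_needed / len(ip_list))
--     else:
--         cycles_needed = 1
--         ip_list = ip_list[:nodes_needed]
--
--     rankfile_content = []
--     rank = 0
--
--     while rank < total_processes:
--         for ip in ip_list:
--             for cpu_id in range(cpu_per_node):
--                 cores_available = cores_per_cpu
--                 procs_on_this_cpu = cores_available // cores_per_process
--
--                 for i in range(procs_on_this_cpu):
--                     if rank >= total_processes:
--                         break
--
--                     start_core = i * cores_per_process
--                     #end_core = start_core + cores_per_process - 1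
--                     end_core = start_core + cores_per_process
--
--
--                     if end_core >= cores_per_cpu:
--                         end_core = cores_per_cpu - 1
--
--                     start_core = start_core + 4
--
--                     rank_entry = f"rank {rank:4d} = {ip} slot={cpu_id}:{start_core}"
--                     rankfile_content.append(rank_entry)
--
--                     rank += 1
--
--                     if rank >= total_processes:
--                         break
--
--                 if rank >= total_processes:
--                     break
--
--             if rank >= total_processes:
--                 break
--
--     return "\n".join(rankfile_content)
-- ===== SOURCE B (Python) =====
-- import math
--
-- def generate_rankfile(total_processes, ip_list, cores_per_process):
--     if not ip_list:
--         raise ValueError("IP list cannot be empty")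
--
--     slots_per_cpu = 304 // cores_per_process
--     slots_per_node = 2 * slots_per_cpu
--
--     processes_per_node = 608 // cores_per_process
--     nodes_needed = math.ceil(total_processes / processes_per_node)
--     if nodes_needed <= len(ip_list):
--         ip_list = ip_list[:nodes_needed]
--
--     # Closed-form placement: each rank's node/socket/core is computed directly
--     # by division, no simulation of the node/socket/slot loops.
--     lines = []
--     for rank in range(total_processes):
--         node, within = divmod(rank, slots_per_node)
--         cpu_id, slot = divmod(within, slots_per_cpu)
--         ip = ip_list[node % len(ip_list)]
--         lines.append(f"rank {rank:4d} = {ip} slot={cpu_id}:{slot * cores_per_process + 4}")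
--     return "\n".join(lines)
-- ===== Notes on version B (the rewrite author's own statement) =====
-- stated objective: alternative
-- what changed: Replaces A's simulation of the nested node/socket/slot loops (with break-out guards and a running rank counter) by a closed-form placement: one flat pass over range(total_processes) that computes each rank's node, socket and starting core directly by divmod arithmetic.
import Mathlib
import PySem

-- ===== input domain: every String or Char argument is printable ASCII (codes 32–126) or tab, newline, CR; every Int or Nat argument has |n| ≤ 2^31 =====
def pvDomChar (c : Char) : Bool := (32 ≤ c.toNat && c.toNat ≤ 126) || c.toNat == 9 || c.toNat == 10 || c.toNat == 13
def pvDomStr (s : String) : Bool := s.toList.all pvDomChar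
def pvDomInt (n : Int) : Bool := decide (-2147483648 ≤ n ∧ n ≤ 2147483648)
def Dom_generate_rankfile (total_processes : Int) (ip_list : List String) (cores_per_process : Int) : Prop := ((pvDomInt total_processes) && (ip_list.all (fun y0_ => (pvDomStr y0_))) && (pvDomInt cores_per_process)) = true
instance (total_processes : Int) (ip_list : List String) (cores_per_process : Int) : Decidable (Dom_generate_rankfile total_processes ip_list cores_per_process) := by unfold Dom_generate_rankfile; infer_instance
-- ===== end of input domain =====

set_option maxHeartbeats 1000000


-- B drops A's simulation of the nested node/socket/slot loops and instead computes each
-- rank's node, socket and core start in closed form by divmod arithmetic, in one flat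
-- pass over the ranks; same return value on Pre_ (objective: alternative).

-- f"rank {rank:4d} = {ip} slot={cpu_id}:{start_core}"  (shared by both ports: same f-string in both Pythons)
def pvFmt (rank : Int) (ip : String) (cpu : Int) (start : Int) : String :=
  let rs := PySem.Int.toChars rank
  String.ofList ("rank ".toList ++ List.replicate (4 - rs.length) ' ' ++ rs
    ++ " = ".toList ++ ip.toList ++ " slot=".toList
    ++ PySem.Int.toChars cpu ++ [':'] ++ PySem.Int.toChars start)

-- ===== PORT A =====
-- innermost 'for i in range(procs_on_this_cpu)' body, with its break guard
def pvStepA (total cpp : Int) (ip : String) (cpu : Int) (st : Int × List String) (i : Int) : Int × List String :=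
  if st.1 ≥ total then st
  else
    let start_core := i * cpp
    let end_core := start_core + cpp
    let _end_core := if end_core ≥ 304 then (304 : Int) - 1 else end_core  -- computed by A, unused in the entry
    let start_core := start_core + 4
    (st.1 + 1, st.2 ++ [pvFmt st.1 ip cpu start_core])

-- 'for cpu_id in range(cpu_per_node)' body ('if rank >= total: break' = leading guard)
def pvForCpu (total cpp : Int) (ip : String) (st : Int × List String) (cpu : Int) : Int × List String :=
  if st.1 ≥ total then st
  else (PySem.List.pyRange 0 (PySem.Int.floordiv 304 cpp) 1).foldl (pvStepA total cpp ip cpu) st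

-- 'for ip in ip_list' body
def pvForIp (total cpp : Int) (st : Int × List String) (ip : String) : Int × List String :=
  if st.1 ≥ total then st
  else (PySem.List.pyRange 0 2 1).foldl (pvForCpu total cpp ip) st

-- 'while rank < total_processes'; fuel total.toNat+1 suffices on Pre_ (each pass emits ≥ 1 entry)
def pvWhileA (total cpp : Int) (ips : List String) : Nat → Int × List String → Int × List String
  | 0, st => st
  | f + 1, st =>
    if st.1 < total then pvWhileA total cpp ips f (ips.foldl (pvForIp total cpp) st) else st

def generate_rankfile (total_processes : Int) (ip_list : List String) (cores_per_process : Int) : String :=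
  -- 'if not ip_list: raise ValueError' — excluded by Pre_
  let cores_per_node : Int := 2 * 304
  let _total_cores_needed := total_processes * cores_per_process
  let ppn := PySem.Int.floordiv cores_per_node cores_per_process  -- cpp ≠ 0 on Pre_
  -- math.ceil(total/ppn): exact integer ceiling on the admitted domain (|n| ≤ 2^31 ≪ 2^53, ppn ≠ 0 on Pre_)
  let nodes_needed := -(PySem.Int.floordiv (-total_processes) ppn)
  -- cycles_needed is computed by A but never used afterwards
  let ips2 := if nodes_needed > (ip_list.length : Int) then ip_list
              else PySem.List.slice ip_list none (some nodes_needed)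
  PySem.Str.join "\n" (pvWhileA total_processes cores_per_process ips2 (total_processes.toNat + 1) (0, [])).2

-- ===== PORT B =====
-- the loop body of Source B: node, within = divmod(rank, spn); cpu_id, slot = divmod(within, spc)
def pvLineB (ips2 : List String) (cpp spc r : Int) : String :=
  let spn := 2 * spc
  let node := PySem.Int.floordiv r spn
  let within := PySem.Int.mod r spn
  let cpu_id := PySem.Int.floordiv within spc
  let slot := PySem.Int.mod within spc
  -- ip_list[node % len(ip_list)]: the index is in [0, len) whenever the loop runs (totalised with "")
  let ip := (PySem.List.pyGet? ips2 (PySem.Int.mod node (ips2.length : Int))).getD ""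
  pvFmt r ip cpu_id (slot * cpp + 4)

def generate_rankfile_alt (total_processes : Int) (ip_list : List String) (cores_per_process : Int) : String :=
  -- 'if not ip_list: raise ValueError' — excluded by Pre_
  let slots_per_cpu := PySem.Int.floordiv 304 cores_per_process  -- cpp ≠ 0 on Pre_
  let ppn := PySem.Int.floordiv 608 cores_per_process
  let nodes_needed := -(PySem.Int.floordiv (-total_processes) ppn)  -- math.ceil, exact on the domain
  let ips2 := if nodes_needed ≤ (ip_list.length : Int)
              then PySem.List.slice ip_list none (some nodes_needed) else ip_list
  PySem.Str.join "\n"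
    ((PySem.List.pyRange 0 total_processes 1).foldl
      (fun acc r => acc ++ [pvLineB ips2 cores_per_process slots_per_cpu r]) [])

-- ===== PRECONDITION & SPEC =====
-- Pre_ excludes exactly the inputs on which A does not return: empty ip_list (ValueError),
-- cores_per_process = 0 (ZeroDivisionError), 608 // cpp = 0 i.e. cpp > 608 (ZeroDivisionError in the ceil),
-- and total_processes > 0 with cpp outside 1..304 (no per-pass progress: A loops forever).
def Pre_generate_rankfile (total_processes : Int) (ip_list : List String) (cores_per_process : Int) : Prop :=
  ip_list ≠ [] ∧ cores_per_process ≠ 0 ∧ PySem.Int.floordiv 608 cores_per_process ≠ 0 ∧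
    (0 < total_processes → (1 ≤ cores_per_process ∧ cores_per_process ≤ 304))
instance (total_processes : Int) (ip_list : List String) (cores_per_process : Int) : Decidable (Pre_generate_rankfile total_processes ip_list cores_per_process) := by unfold Pre_generate_rankfile; infer_instance

def pvWitness_generate_rankfile : Int × List String × Int := (4, ["10.0.0.1", "10.0.0.2"], 3)

def Spec_generate_rankfile (total_processes : Int) (ip_list : List String) (cores_per_process : Int) (out : String) : Prop := out = generate_rankfile_alt total_processes ip_list cores_per_process
instance (total_processes : Int) (ip_list : List String) (cores_per_process : Int) (out : String) : Decidable (Spec_generate_rankfile total_processes ip_list cores_per_process out) := by unfold Spec_generate_rankfile; infer_instance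

-- ===== CLAIM (what is proved, stated in full; the proofs are below) =====
def Claim_equal_generate_rankfile : Prop := ∀ (total_processes : Int) (ip_list : List String) (cores_per_process : Int), Dom_generate_rankfile total_processes ip_list cores_per_process → Pre_generate_rankfile total_processes ip_list cores_per_process → Spec_generate_rankfile total_processes ip_list cores_per_process (generate_rankfile total_processes ip_list cores_per_process)

-- ===== LEMMAS AND PROOFS =====

-- B's line list for ranks r0, r0+1, …, r0+E-1
def pvLinesB (ips2 : List String) (cpp spc r0 : Int) (E : Nat) : List String :=
  (List.range E).map (fun (j : Nat) => pvLineB ips2 cpp spc (r0 + (j : Int)))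

theorem pvLinesB_add (ips2 : List String) (cpp spc r0 : Int) (E0 E1 : Nat) :
    pvLinesB ips2 cpp spc r0 (E0 + E1)
      = pvLinesB ips2 cpp spc r0 E0 ++ pvLinesB ips2 cpp spc (r0 + (E0 : Int)) E1 := by
  unfold pvLinesB
  rw [List.range_add, List.map_append, List.map_map]
  congr 1
  apply List.map_congr_left
  intro k _
  simp only [Function.comp_apply]
  congr 1
  push_cast
  ring

-- once the rank has reached total, every remaining loop is a no-op
theorem pvStepA_fix (total cpp : Int) (ip : String) (cpu : Int) (l : List Int) (st : Int × List String)
    (h : total ≤ st.1) : l.foldl (pvStepA total cpp ip cpu) st = st := by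
  induction l with
  | nil => rfl
  | cons c rest ih => simpa [pvStepA, h] using ih

theorem pvForIp_fix (total cpp : Int) (l : List String) (st : Int × List String)
    (h : total ≤ st.1) : l.foldl (pvForIp total cpp) st = st := by
  induction l with
  | nil => rfl
  | cons ip rest ih => simpa [pvForIp, h] using ih

theorem pvWhileA_done (total cpp : Int) (ips : List String) (st : Int × List String)
    (h : ¬ st.1 < total) (f : Nat) : pvWhileA total cpp ips f st = st := by
  cases f <;> simp [pvWhileA, h]

-- an emitted entry of A's inner loop equals B's closed-form line (the arithmetic core)
theorem pvLine_of (ips2 : List String) (cpp spc s cpu : Int) (j : Nat) (ip : String)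
    (hspc : 1 ≤ spc) (hL : 0 < (ips2.length : Int)) (hcpu : cpu = 0 ∨ cpu = 1)
    (hmod : s % (2 * spc) = cpu * spc)
    (hip : ip = (PySem.List.pyGet? ips2 ((s / (2 * spc)) % (ips2.length : Int))).getD "")
    (hj : (j : Int) < spc) :
    pvFmt (s + (j : Int)) ip cpu ((j : Int) * cpp + 4) = pvLineB ips2 cpp spc (s + (j : Int)) := by
  have hb : (0 : Int) < 2 * spc := by omega
  have hsp : (0 : Int) < spc := by omega
  have hX0 : (0 : Int) ≤ cpu * spc + (j : Int) := by rcases hcpu with rfl | rfl <;> simp <;> omega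
  have hX1 : cpu * spc + (j : Int) < 2 * spc := by rcases hcpu with rfl | rfl <;> simp <;> omega
  have hsdec := Int.ediv_add_emod s (2 * spc)
  rw [hmod] at hsdec
  -- s + j = (cpu*spc + j) + (2*spc) * (s / (2*spc))
  have hdecomp : s + (j : Int) = (cpu * spc + (j : Int)) + (2 * spc) * (s / (2 * spc)) := by
    linarith
  have e1 : (s + (j : Int)) % (2 * spc) = cpu * spc + (j : Int) := by
    rw [hdecomp, Int.add_mul_emod_self_left, Int.emod_eq_of_lt hX0 hX1]
  have e2 : (s + (j : Int)) / (2 * spc) = s / (2 * spc) := by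
    rw [hdecomp, Int.add_mul_ediv_left _ _ (by omega : (2:Int) * spc ≠ 0),
      Int.ediv_eq_zero_of_lt hX0 hX1, zero_add]
  have hc : cpu * spc + (j : Int) = (j : Int) + spc * cpu := by ring
  have e3 : (cpu * spc + (j : Int)) / spc = cpu := by
    rw [hc, Int.add_mul_ediv_left _ _ (by omega : spc ≠ 0),
      Int.ediv_eq_zero_of_lt (by positivity) hj, zero_add]
  have e4 : (cpu * spc + (j : Int)) % spc = (j : Int) := by
    rw [hc, Int.add_mul_emod_self_left, Int.emod_eq_of_lt (by positivity) hj]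
  simp only [pvLineB, PySem.Int.floordiv_eq_ediv_of_pos hb, PySem.Int.mod_eq_emod_of_pos hb,
    PySem.Int.floordiv_eq_ediv_of_pos hsp, PySem.Int.mod_eq_emod_of_pos hsp,
    PySem.Int.mod_eq_emod_of_pos hL]
  rw [e1, e2, e3, e4, hip]

-- A's innermost loop in lockstep: index d+j goes with rank s+j until total is reached
theorem pv_inner (t cpp : Int) (ip : String) (cpu : Int) :
    ∀ (m : Nat) (d s : Int) (acc : List String),
    ((List.range m).map (fun (k : Nat) => d + (k : Int))).foldl (pvStepA t cpp ip cpu) (s, acc)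
      = (s + (min m (t - s).toNat : Nat),
         acc ++ (List.range (min m (t - s).toNat)).map
           (fun (j : Nat) => pvFmt (s + (j : Int)) ip cpu ((d + (j : Int)) * cpp + 4))) := by
  intro m
  induction m with
  | zero => intro d s acc; simp
  | succ m ih =>
    intro d s acc
    rw [List.range_succ_eq_map]
    by_cases hst : s ≥ t
    · have h0 : (t - s).toNat = 0 := by omega
      simp only [List.map_cons, List.foldl_cons]
      rw [show pvStepA t cpp ip cpu (s, acc) (d + (0:Nat)) = (s, acc) by simp [pvStepA, hst]]
      rw [pvStepA_fix t cpp ip cpu _ _ (by simpa using hst)]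
      simp [h0]
    · have hlt : s < t := by omega
      have hstep : pvStepA t cpp ip cpu (s, acc) (d + ((0:Nat):Int)) =
          (s + 1, acc ++ [pvFmt s ip cpu (d * cpp + 4)]) := by
        simp [pvStepA, hst]
      have hmap : ((List.range m).map Nat.succ).map (fun (k : Nat) => d + (k : Int))
          = (List.range m).map (fun (k : Nat) => (d + 1) + (k : Int)) := by
        rw [List.map_map]; apply List.map_congr_left; intro k _
        simp only [Function.comp]; push_cast; ring
      simp only [List.map_cons, List.foldl_cons]
      rw [hstep, hmap, ih (d + 1) (s + 1)]
      have hE : min (m + 1) (t - s).toNat = min m (t - (s + 1)).toNat + 1 := by omega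
      rw [hE]
      simp only [Prod.mk.injEq]
      constructor
      · push_cast; ring
      · rw [List.range_succ_eq_map, List.map_cons, List.append_assoc, List.singleton_append,
          List.map_map]
        simp only [Nat.cast_zero, add_zero]
        congr 1
        congr 1
        apply List.map_congr_left
        intro k _
        simp only [Function.comp_apply]
        congr 1 <;> push_cast <;> ring

-- one node's worth of A (both sockets) equals B's lines for that rank window
theorem pv_cpu (t cpp spc : Int) (ips2 : List String) (ip : String) (r0 : Int) (acc : List String)
    (hspc : 1 ≤ spc) (hspceq : PySem.Int.floordiv 304 cpp = spc) (hL : 0 < (ips2.length : Int))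
    (hmod : r0 % (2 * spc) = 0) (hr0t : r0 < t)
    (hip : ip = (PySem.List.pyGet? ips2 ((r0 / (2 * spc)) % (ips2.length : Int))).getD "") :
    pvForIp t cpp (r0, acc) ip
      = (min t (r0 + 2 * spc),
         acc ++ pvLinesB ips2 cpp spc r0 ((min t (r0 + 2 * spc)) - r0).toNat) := by
  have hb : (0 : Int) < 2 * spc := by omega
  have hr0dec := Int.ediv_add_emod r0 (2 * spc)
  rw [hmod, add_zero] at hr0dec   -- 2*spc*(r0/(2*spc)) = r0
  have hg : ¬ ((r0, acc).1 ≥ t) := by simpa using (by omega : ¬ r0 ≥ t)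
  have h01 : PySem.List.pyRange (0 : Int) 2 1 = [0, 1] := by decide
  set E0 := min spc.toNat (t - r0).toNat with hE0
  have hmap0 : (List.range E0).map
        (fun (j : Nat) => pvFmt (r0 + (j : Int)) ip 0 ((0 + (j : Int)) * cpp + 4))
      = pvLinesB ips2 cpp spc r0 E0 := by
    unfold pvLinesB
    apply List.map_congr_left
    intro j hj
    have hjr := List.mem_range.mp hj
    have hjlt : (j : Int) < spc := by omega
    have h := pvLine_of ips2 cpp spc r0 0 j ip hspc hL (Or.inl rfl)
      (by rw [zero_mul]; exact hmod) hip hjlt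
    simpa using h
  have hC0 : pvForCpu t cpp ip (r0, acc) 0
      = (r0 + (E0 : Int), acc ++ pvLinesB ips2 cpp spc r0 E0) := by
    unfold pvForCpu
    rw [if_neg hg, hspceq, PySem.List.pyRange_one,
      show ((spc - 0).toNat) = spc.toNat by omega,
      pv_inner t cpp ip 0 spc.toNat 0 r0 acc, ← hE0, hmap0]
  unfold pvForIp
  rw [if_neg hg, h01]
  simp only [List.foldl_cons, List.foldl_nil]
  rw [hC0]
  by_cases hsmall : t ≤ r0 + spc
  · -- total reached on (or before the end of) socket 0: socket 1 is a no-op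
    have hE0v : (E0 : Int) = t - r0 := by omega
    have hg1 : ((r0 + (E0 : Int), acc ++ pvLinesB ips2 cpp spc r0 E0).1 ≥ t) := by
      simp only []
      omega
    unfold pvForCpu
    rw [if_pos hg1]
    simp only [Prod.mk.injEq]
    constructor
    · omega
    · congr 1
      congr 1
      omega
  · -- socket 0 filled completely; run socket 1 from rank r0 + spc
    have hE0v : E0 = spc.toNat := by omega
    have hr1 : r0 + (E0 : Int) = r0 + spc := by omega
    set r1 := r0 + spc with hr1def
    have hr1dec : r1 = spc + 2 * spc * (r0 / (2 * spc)) := by omega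
    have hmod1 : r1 % (2 * spc) = 1 * spc := by
      rw [hr1dec, Int.add_mul_emod_self_left, Int.emod_eq_of_lt (by omega) (by omega), one_mul]
    have hdiv1 : r1 / (2 * spc) = r0 / (2 * spc) := by
      rw [hr1dec, Int.add_mul_ediv_left _ _ (by omega : (2 : Int) * spc ≠ 0),
        Int.ediv_eq_zero_of_lt (by omega) (by omega), zero_add]
    set E1 := min spc.toNat (t - r1).toNat with hE1
    have hmap1 : (List.range E1).map
          (fun (j : Nat) => pvFmt (r1 + (j : Int)) ip 1 ((0 + (j : Int)) * cpp + 4))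
        = pvLinesB ips2 cpp spc r1 E1 := by
      unfold pvLinesB
      apply List.map_congr_left
      intro j hj
      have hjr := List.mem_range.mp hj
      have hjlt : (j : Int) < spc := by omega
      have h := pvLine_of ips2 cpp spc r1 1 j ip hspc hL (Or.inr rfl)
        (by rw [hmod1]) (by rw [hdiv1]; exact hip) hjlt
      simpa using h
    have hg2 : ¬ ((r1, acc ++ pvLinesB ips2 cpp spc r0 E0).1 ≥ t) := by
      simp only []
      omega
    rw [hr1]
    unfold pvForCpu
    rw [if_neg hg2, hspceq, PySem.List.pyRange_one,
      show ((spc - 0).toNat) = spc.toNat by omega,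
      pv_inner t cpp ip 1 spc.toNat 0 r1 (acc ++ pvLinesB ips2 cpp spc r0 E0), ← hE1, hmap1]
    simp only [Prod.mk.injEq]
    constructor
    · omega
    · rw [List.append_assoc]
      congr 1
      have hcount : ((min t (r0 + 2 * spc)) - r0).toNat = E0 + E1 := by omega
      rw [hcount, pvLinesB_add]
      congr 2
      omega

-- folding A's per-IP pass over a list whose k-th entry is node (n0+k)'s IP
theorem pv_ips (t cpp spc : Int) (ips2 : List String)
    (hspc : 1 ≤ spc) (hspceq : PySem.Int.floordiv 304 cpp = spc) (hL : 0 < (ips2.length : Int)) :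
    ∀ (l : List String) (n0 r0 : Int) (acc : List String),
    r0 = n0 * (2 * spc) → r0 ≤ t →
    (∀ (k : Nat), (hk : k < l.length) →
      l[k] = (PySem.List.pyGet? ips2 (((n0 + (k : Int))) % (ips2.length : Int))).getD "") →
    l.foldl (pvForIp t cpp) (r0, acc)
      = (min t (r0 + (l.length : Int) * (2 * spc)),
         acc ++ pvLinesB ips2 cpp spc r0 ((min t (r0 + (l.length : Int) * (2 * spc))) - r0).toNat) := by
  intro l
  induction l with
  | nil =>
    intro n0 r0 acc hr0 hrt hl
    simp only [List.foldl_nil, List.length_nil, Nat.cast_zero, zero_mul, add_zero]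
    rw [show min t r0 = r0 by omega]
    simp [pvLinesB]
  | cons ip l' ih =>
    intro n0 r0 acc hr0 hrt hl
    have hX : (0 : Int) ≤ (l'.length : Int) * (2 * spc) := by positivity
    have hlen : (((ip :: l').length : Nat) : Int) * (2 * spc)
        = 2 * spc + (l'.length : Int) * (2 * spc) := by
      simp only [List.length_cons]; push_cast; ring
    by_cases hr : r0 < t
    · have hip0 := hl 0 (by simp)
      simp only [List.getElem_cons_zero, Nat.cast_zero, add_zero] at hip0
      have hmodr : r0 % (2 * spc) = 0 := by
        rw [hr0]; exact Int.mul_emod_left n0 (2 * spc)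
      have hdivr : r0 / (2 * spc) = n0 := by
        rw [hr0]; exact Int.mul_ediv_cancel n0 (by omega)
      rw [List.foldl_cons,
        pv_cpu t cpp spc ips2 ip r0 acc hspc hspceq hL hmodr hr (by rw [hdivr]; exact hip0)]
      by_cases h2 : t ≤ r0 + 2 * spc
      · have hmin : min t (r0 + 2 * spc) = t := by omega
        rw [pvForIp_fix t cpp l' _ (by simp only []; omega)]
        simp only [Prod.mk.injEq]
        rw [hlen]
        obtain ⟨X, hXeq, hXnn⟩ :
            ∃ X : Int, (l'.length : Int) * (2 * spc) = X ∧ 0 ≤ X := ⟨_, rfl, hX⟩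
        rw [hXeq]
        constructor
        · omega
        · congr 2
          omega
      · have hminv : min t (r0 + 2 * spc) = r0 + 2 * spc := by omega
        have hstep : r0 + 2 * spc = (n0 + 1) * (2 * spc) := by rw [hr0]; ring
        have hl' : ∀ (k : Nat), (hk : k < l'.length) →
            l'[k] = (PySem.List.pyGet? ips2
              (((n0 + 1 + (k : Int))) % (ips2.length : Int))).getD "" := by
          intro k hk
          have h := hl (k + 1) (by simp; omega)
          simp only [List.getElem_cons_succ] at h
          rw [h]
          have hk1 : n0 + (((k + 1 : Nat)) : Int) = n0 + 1 + (k : Int) := by push_cast; ring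
          rw [hk1]
        rw [hminv, ih (n0 + 1) (r0 + 2 * spc) _ hstep (by omega) hl']
        simp only [Prod.mk.injEq]
        rw [hlen]
        have hcast : (((2 * spc).toNat : Nat) : Int) = 2 * spc := by omega
        obtain ⟨X, hXeq, hXnn⟩ :
            ∃ X : Int, (l'.length : Int) * (2 * spc) = X ∧ 0 ≤ X := ⟨_, rfl, hX⟩
        rw [hXeq]
        constructor
        · omega
        · rw [show ((r0 + 2 * spc) - r0).toNat = (2 * spc).toNat by omega,
            List.append_assoc]
          congr 1
          rw [show ((min t (r0 + (2 * spc + X))) - r0).toNat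
              = (2 * spc).toNat + ((min t (r0 + 2 * spc + X)) - (r0 + 2 * spc)).toNat by omega,
            pvLinesB_add, hcast]
    · have hr0t : r0 = t := by omega
      rw [pvForIp_fix t cpp (ip :: l') _ (by simp only []; omega)]
      simp only [Prod.mk.injEq]
      rw [hlen]
      obtain ⟨X, hXeq, hXnn⟩ :
          ∃ X : Int, (l'.length : Int) * (2 * spc) = X ∧ 0 ≤ X := ⟨_, rfl, hX⟩
      rw [hXeq]
      constructor
      · omega
      · rw [show ((min t (r0 + (2 * spc + X))) - r0).toNat = 0 by omega]
        simp [pvLinesB]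

-- A's while-loop, from a pass boundary, emits exactly B's lines for the remaining ranks
theorem pv_while (t cpp spc : Int) (ips2 : List String)
    (hspc : 1 ≤ spc) (hspceq : PySem.Int.floordiv 304 cpp = spc)
    (_hips : ips2 ≠ []) (hL : 0 < (ips2.length : Int)) :
    ∀ (fuel : Nat) (c r0 : Int) (acc : List String),
    r0 = c * ((ips2.length : Int) * (2 * spc)) → r0 ≤ t → (t - r0).toNat ≤ fuel →
    (pvWhileA t cpp ips2 fuel (r0, acc)).2 = acc ++ pvLinesB ips2 cpp spc r0 (t - r0).toNat := by
  intro fuel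
  induction fuel with
  | zero =>
    intro c r0 acc hr0 hrt hf
    rw [show (t - r0).toNat = 0 by omega]
    simp [pvWhileA, pvLinesB]
  | succ f ih =>
    intro c r0 acc hr0 hrt hf
    have h2s : (0 : Int) < 2 * spc := by omega
    have hXpos : (0 : Int) < (ips2.length : Int) * (2 * spc) := mul_pos hL h2s
    by_cases h : r0 < t
    · rw [pvWhileA, if_pos (by simpa using h)]
      have hr0' : r0 = (c * (ips2.length : Int)) * (2 * spc) := by rw [hr0]; ring
      have hnext : r0 + (ips2.length : Int) * (2 * spc)
          = (c + 1) * ((ips2.length : Int) * (2 * spc)) := by rw [hr0]; ring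
      have hl : ∀ (k : Nat), (hk : k < ips2.length) →
          ips2[k] = (PySem.List.pyGet? ips2
            (((c * (ips2.length : Int) + (k : Int))) % (ips2.length : Int))).getD "" := by
        intro k hk
        have hmodk : (c * (ips2.length : Int) + (k : Int)) % (ips2.length : Int) = (k : Int) := by
          rw [show c * (ips2.length : Int) + (k : Int)
              = (k : Int) + (ips2.length : Int) * c by ring,
            Int.add_mul_emod_self_left, Int.emod_eq_of_lt (by omega) (by omega)]
        rw [hmodk, PySem.List.pyGet?_natCast, List.getElem?_eq_getElem hk]
        rfl
      rw [pv_ips t cpp spc ips2 hspc hspceq hL ips2 (c * (ips2.length : Int)) r0 acc hr0'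
        (by omega) hl]
      by_cases h2 : t ≤ r0 + (ips2.length : Int) * (2 * spc)
      · rw [min_eq_left h2, pvWhileA_done t cpp ips2 _ (lt_irrefl t) f]
      · have h2' : r0 + (ips2.length : Int) * (2 * spc) ≤ t := le_of_lt (lt_of_not_ge h2)
        have hfuel : (t - (r0 + (ips2.length : Int) * (2 * spc))).toNat ≤ f := by
          obtain ⟨X, hXeq, hX1⟩ :
              ∃ X : Int, (ips2.length : Int) * (2 * spc) = X ∧ 1 ≤ X := ⟨_, rfl, hXpos⟩
          rw [hXeq]
          rw [hXeq] at h2'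
          omega
        rw [min_eq_right h2', ih (c + 1) _ _ hnext h2' hfuel, List.append_assoc]
        congr 1
        obtain ⟨X, hXeq, hX1⟩ :
            ∃ X : Int, (ips2.length : Int) * (2 * spc) = X ∧ 1 ≤ X := ⟨_, rfl, hXpos⟩
        rw [hXeq]
        rw [hXeq] at h2'
        rw [show (t - r0).toNat = ((r0 + X) - r0).toNat + (t - (r0 + X)).toNat by omega,
          pvLinesB_add]
        congr 2
        omega
    · rw [pvWhileA, if_neg (by simpa using h),
        show (t - r0).toNat = 0 by omega]
      simp [pvLinesB]

-- B's fold is the map of its line function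
theorem pv_fold_B (ips2 : List String) (cpp spc : Int) (l : List Int) (acc : List String) :
    l.foldl (fun acc r => acc ++ [pvLineB ips2 cpp spc r]) acc
      = acc ++ l.map (pvLineB ips2 cpp spc) := by
  induction l generalizing acc with
  | nil => simp
  | cons x rest ih => simp [ih]

-- ===== VERDICT (by name: the statement is the Claim_ definition above) =====
theorem generate_rankfile_spec : Claim_equal_generate_rankfile := by
  intro tp ips cpp _hdom hpre
  obtain ⟨hips, hcpp, hppn, hpos⟩ := hpre
  unfold Spec_generate_rankfile generate_rankfile generate_rankfile_alt
  have h608 : PySem.Int.floordiv (2 * 304) cpp = PySem.Int.floordiv 608 cpp := by norm_num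
  simp only [h608]
  set nn := -(PySem.Int.floordiv (-tp) (PySem.Int.floordiv 608 cpp)) with hnn
  have hif : (if nn > (ips.length : Int) then ips else PySem.List.slice ips none (some nn))
      = (if nn ≤ (ips.length : Int) then PySem.List.slice ips none (some nn) else ips) := by
    by_cases h : nn > (ips.length : Int)
    · rw [if_pos h, if_neg (by omega)]
    · rw [if_neg h, if_pos (by omega)]
  rw [hif]
  set ips2 := (if nn ≤ (ips.length : Int) then PySem.List.slice ips none (some nn) else ips)
    with hips2
  congr 1
  by_cases hpost : 0 < tp
  · obtain ⟨hc1, hc2⟩ := hpos hpost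
    set spc := PySem.Int.floordiv 304 cpp with hspcdef
    have hspc : 1 ≤ spc := (PySem.Int.le_floordiv_iff_mul_le (by omega)).2 (by omega)
    have hppn2 : 2 ≤ PySem.Int.floordiv 608 cpp :=
      (PySem.Int.le_floordiv_iff_mul_le (by omega)).2 (by omega)
    have hnn1 : 1 ≤ nn := by
      have : PySem.Int.floordiv (-tp) (PySem.Int.floordiv 608 cpp) < 0 :=
        (PySem.Int.floordiv_lt_iff_lt_mul (by omega)).2 (by omega)
      omega
    have hips2ne : ips2 ≠ [] := by
      rw [hips2]
      by_cases hcase : nn ≤ (ips.length : Int)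
      · rw [if_pos hcase, PySem.List.slice_to ips (show (0 : Int) ≤ nn by omega)]
        intro hnil
        rcases List.take_eq_nil_iff.1 hnil with h0 | h0
        · omega
        · exact hips h0
      · rw [if_neg hcase]; exact hips
    have hL : 0 < (ips2.length : Int) := by
      have := List.length_pos_of_ne_nil hips2ne
      omega
    rw [pv_while tp cpp spc ips2 hspc hspcdef.symm hips2ne hL (tp.toNat + 1) 0 0 []
      (by ring) (by omega) (by omega)]
    rw [pv_fold_B ips2 cpp spc (PySem.List.pyRange 0 tp 1) [], PySem.List.pyRange_one,
      List.map_map]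
    simp only [List.nil_append, sub_zero]
    unfold pvLinesB
    apply List.map_congr_left
    intro k _
    simp [Function.comp_apply]
  · rw [pvWhileA_done tp cpp ips2 (0, []) (by simpa using hpost) _,
      PySem.List.pyRange_one_eq_nil (by omega)]
    simp
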